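-- pv_equiv track=rewrite | github.com/cjgsongsong/cs199aclthesis | linearorders.py | generateHammockRelations
-- ===== SOURCE A (Python) =====
-- def generateHammockRelations(parent, vertices, relations, isHammockLevel):
--     # TO-DO: fix
--     if len(vertices) == 1:
--         return [sorted(relations)]
--     else:
--         rels = []
--         for child in vertices:
--             newVertices = [v for v in vertices if v != child]
--             newRelations = relations + [(parent, child)]
--             if isHammockLevel:
--                 rels.extend(generateHammockRelations(parent, newVertices, newRelations, True))
--                 rels.extend(generateHammockRelations(child, newVertices, newRelations, False))
--             else:
--                 rels.extend(generateHammockRelations(child, newVertices, newRelations, True))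
--                 rels.extend(generateHammockRelations(child, newVertices, newRelations, False))
--
--         truerels = []
--         for rel in rels:
--             if rel not in truerels: truerels.append(rel)
--
--         return rels
-- ===== SOURCE B (Python) =====
-- def generateHammockRelations(parent, vertices, relations, isHammockLevel):
--     # Iterative worklist version: explicit stack of frames instead of recursion;
--     # the dead 'truerels' dedup pass of the original is dropped (its result is unused).
--     results = []
--     stack = [(parent, vertices, relations, isHammockLevel)]
--     while stack:
--         p, vs, rels, isH = stack.pop()
--         if len(vs) == 1:
--             results.append(sorted(rels))
--         else:
--             frames = []
--             for child in vs:
--                 newVertices = [v for v in vs if v != child]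
--                 newRelations = rels + [(p, child)]
--                 if isH:
--                     frames.append((p, newVertices, newRelations, True))
--                     frames.append((child, newVertices, newRelations, False))
--                 else:
--                     frames.append((child, newVertices, newRelations, True))
--                     frames.append((child, newVertices, newRelations, False))
--             stack.extend(reversed(frames))
--     return results
-- ===== Notes on version B (the rewrite author's own statement) =====
-- stated objective: alternative
-- what changed: Replaces the recursion with an explicit worklist/stack loop (frames pushed so pop order matches the original DFS emission order) and drops the dead 'truerels' deduplication pass whose result A never uses.
import Mathlib
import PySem

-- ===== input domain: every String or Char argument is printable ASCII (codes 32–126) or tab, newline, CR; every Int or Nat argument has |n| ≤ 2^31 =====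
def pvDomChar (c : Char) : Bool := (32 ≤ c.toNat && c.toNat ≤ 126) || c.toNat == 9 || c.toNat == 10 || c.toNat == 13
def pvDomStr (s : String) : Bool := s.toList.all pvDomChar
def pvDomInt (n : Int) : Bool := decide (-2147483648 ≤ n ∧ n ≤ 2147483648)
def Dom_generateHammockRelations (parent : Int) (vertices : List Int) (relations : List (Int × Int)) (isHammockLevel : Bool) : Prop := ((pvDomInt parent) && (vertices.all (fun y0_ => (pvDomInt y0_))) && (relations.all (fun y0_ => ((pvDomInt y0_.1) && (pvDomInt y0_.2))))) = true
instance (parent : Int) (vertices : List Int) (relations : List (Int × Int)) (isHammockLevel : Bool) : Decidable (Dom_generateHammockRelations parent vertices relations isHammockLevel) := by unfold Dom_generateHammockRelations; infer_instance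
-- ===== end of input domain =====

-- B replaces the recursion by an explicit worklist/stack loop (frames pushed so the pop
-- order matches the DFS emission order) and drops A's dead 'truerels' dedup pass; objective: alternative decomposition.


-- ===== PORT A =====
-- Literal port of A's recursion; the for-loop over `vertices` becomes the structural
-- recursion `goA` over the pending children (extra Prop argument only for termination).
mutual
def generateHammockRelations (parent : Int) (vertices : List Int) (relations : List (Int × Int)) (isHammockLevel : Bool) : List (List (Int × Int)) :=
  if vertices.length = 1 then
    [PySem.List.sorted2 relations (fun r => r.1) (fun r => r.2)]   -- sorted(relations): pairs sort lexicographically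
  else
    let rels := goA parent vertices vertices relations isHammockLevel (fun _ hx => hx)
    -- A's dead `truerels` dedup loop (its result is never returned):
    let _truerels := rels.foldl (fun acc r => if acc.contains r then acc else acc ++ [r]) ([] : List (List (Int × Int)))
    rels
termination_by (vertices.length, 1, 0)
decreasing_by
  exact Prod.Lex.right _ (Prod.Lex.left _ _ (by omega))

def goA (parent : Int) (pending : List Int) (vertices : List Int) (relations : List (Int × Int)) (isHammockLevel : Bool) (h : ∀ x ∈ pending, x ∈ vertices) : List (List (Int × Int)) :=
  match pending with
  | [] => []
  | child :: rest =>
    let newVertices := vertices.filter (fun v => v != child)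
    let newRelations := relations ++ [(parent, child)]
    (if isHammockLevel then
        generateHammockRelations parent newVertices newRelations true ++
        generateHammockRelations child newVertices newRelations false
      else
        generateHammockRelations child newVertices newRelations true ++
        generateHammockRelations child newVertices newRelations false) ++
    goA parent rest vertices relations isHammockLevel (fun x hx => h x (List.mem_cons_of_mem _ hx))
termination_by (vertices.length, 0, pending.length)
decreasing_by
  all_goals first
    | (apply Prod.Lex.left
       have hc : child ∈ vertices := h child (List.mem_cons_self ..)
       have hlt : (vertices.filter (fun v => v != child)).length < vertices.length := by
         apply List.length_filter_lt_length_iff_exists.mpr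
         exact ⟨child, hc, by simp⟩
       simpa using hlt)
    | (apply Prod.Lex.right; apply Prod.Lex.right; simp)
end

-- ===== PORT B =====
-- Port of Source B: explicit stack of frames (Lean list head = Python stack top, so
-- Python's `stack.extend(reversed(frames))` is `frames ++ rest` here).
def expandB (p : Int) (pending : List Int) (vs : List Int) (rels : List (Int × Int)) (isH : Bool) : List (Int × List Int × List (Int × Int) × Bool) :=
  match pending with
  | [] => []
  | child :: rest =>
    let newVertices := vs.filter (fun v => v != child)
    let newRelations := rels ++ [(p, child)]
    (if isH then [(p, newVertices, newRelations, true), (child, newVertices, newRelations, false)]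
      else [(child, newVertices, newRelations, true), (child, newVertices, newRelations, false)]) ++
    expandB p rest vs rels isH

-- weight function used only to justify termination of the worklist loop
def pvWeight (n : Nat) : Nat := (2*n+2)^n

theorem pvWeight_pos (n : Nat) : 0 < pvWeight n := by
  unfold pvWeight; positivity

theorem pvWeight_mono {m n : Nat} (h : m ≤ n) : pvWeight m ≤ pvWeight n := by
  unfold pvWeight
  calc (2*m+2)^m ≤ (2*n+2)^m := Nat.pow_le_pow_left (by omega) m
    _ ≤ (2*n+2)^n := Nat.pow_le_pow_right (by omega) h

theorem expandB_weight (p : Int) (pending vs : List Int) (rels : List (Int × Int)) (isH : Bool)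
    (h : ∀ x ∈ pending, x ∈ vs) :
    ((expandB p pending vs rels isH).map (fun fr => pvWeight fr.2.1.length)).sum
      ≤ 2 * pending.length * pvWeight (vs.length - 1) := by
  induction pending with
  | nil => simp [expandB]
  | cons child rest ih =>
    have hc : child ∈ vs := h child (List.mem_cons_self ..)
    have hlt : (vs.filter (fun v => v != child)).length < vs.length := by
      apply List.length_filter_lt_length_iff_exists.mpr
      exact ⟨child, hc, by simp⟩
    have hW : pvWeight (vs.filter (fun v => v != child)).length ≤ pvWeight (vs.length - 1) :=
      pvWeight_mono (by omega)
    have ih' := ih (fun x hx => h x (List.mem_cons_of_mem _ hx))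
    have he : 2 * (rest.length + 1) * pvWeight (vs.length - 1)
        = 2 * rest.length * pvWeight (vs.length - 1) + 2 * pvWeight (vs.length - 1) := by ring
    unfold expandB
    cases isH <;> simp only [if_true, if_false, Bool.false_eq_true, List.map_append, List.sum_append,
      List.map_cons, List.map_nil, List.sum_cons, List.sum_nil, List.length_cons] <;> omega

theorem expandB_weight_lt (p : Int) (vs : List Int) (rels : List (Int × Int)) (isH : Bool)
    (hn : vs.length ≠ 1) :
    ((expandB p vs vs rels isH).map (fun fr => pvWeight fr.2.1.length)).sum < pvWeight vs.length := by
  rcases Nat.eq_zero_or_pos vs.length with h0 | hpos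
  · have : vs = [] := List.length_eq_zero_iff.mp h0
    subst this
    simpa [expandB] using pvWeight_pos 0
  · have h1 := expandB_weight p vs vs rels isH (fun _ hx => hx)
    obtain ⟨k, hk⟩ : ∃ k, vs.length = k + 1 := ⟨vs.length - 1, by omega⟩
    have h2 : 2 * vs.length * pvWeight (vs.length - 1) < pvWeight vs.length := by
      rw [hk]
      simp only [Nat.add_sub_cancel]
      unfold pvWeight
      have hstep : 2 * (k + 1) * (2 * k + 2) ^ k = (2 * k + 2) ^ (k + 1) := by
        rw [pow_succ]; ring
      rw [hstep]
      exact Nat.pow_lt_pow_left (by omega) (by omega)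
    omega

def runB (results : List (List (Int × Int))) (stack : List (Int × List Int × List (Int × Int) × Bool)) : List (List (Int × Int)) :=
  match stack with
  | [] => results
  | (p, vs, rels, isH) :: rest =>
    if vs.length = 1 then
      runB (results ++ [PySem.List.sorted2 rels (fun r => r.1) (fun r => r.2)]) rest
    else
      runB results (expandB p vs vs rels isH ++ rest)
termination_by (stack.map (fun fr => pvWeight fr.2.1.length)).sum
decreasing_by
  · have := pvWeight_pos vs.length
    simp only [List.map_cons, List.sum_cons]
    omega
  · have := expandB_weight_lt p vs rels isH (by assumption)
    simp only [List.map_cons, List.sum_cons, List.map_append, List.sum_append]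
    omega

def generateHammockRelations_alt (parent : Int) (vertices : List Int) (relations : List (Int × Int)) (isHammockLevel : Bool) : List (List (Int × Int)) :=
  runB [] [(parent, vertices, relations, isHammockLevel)]

-- ===== PRECONDITION & SPEC =====
def Spec_generateHammockRelations (parent : Int) (vertices : List Int) (relations : List (Int × Int)) (isHammockLevel : Bool) (out : List (List (Int × Int))) : Prop := out = generateHammockRelations_alt parent vertices relations isHammockLevel
instance (parent : Int) (vertices : List Int) (relations : List (Int × Int)) (isHammockLevel : Bool) (out : List (List (Int × Int))) : Decidable (Spec_generateHammockRelations parent vertices relations isHammockLevel out) := by unfold Spec_generateHammockRelations; infer_instance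

-- ===== CLAIM (what is proved, stated in full; the proofs are below) =====
def Claim_equal_generateHammockRelations : Prop := ∀ (parent : Int) (vertices : List Int) (relations : List (Int × Int)) (isHammockLevel : Bool), Dom_generateHammockRelations parent vertices relations isHammockLevel → Spec_generateHammockRelations parent vertices relations isHammockLevel (generateHammockRelations parent vertices relations isHammockLevel)

-- ===== LEMMAS AND PROOFS =====

-- the loop body of A equals the flatMap of A over the frames B pushes
theorem goA_eq_flatMap (p : Int) (pending : List Int) : ∀ (vs : List Int) (rels : List (Int × Int)) (isH : Bool) (h : ∀ x ∈ pending, x ∈ vs),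
    goA p pending vs rels isH h =
      (expandB p pending vs rels isH).flatMap (fun fr => generateHammockRelations fr.1 fr.2.1 fr.2.2.1 fr.2.2.2) := by
  induction pending with
  | nil => intro vs rels isH h; rw [goA.eq_def]; simp [expandB]
  | cons child rest ih =>
    intro vs rels isH h
    rw [goA.eq_def]
    cases isH <;>
      simp [expandB, ih vs rels _ (fun x hx => h x (List.mem_cons_of_mem _ hx)), List.append_assoc]

theorem gen_eq_flatMap_expand (p : Int) (vs : List Int) (rels : List (Int × Int)) (isH : Bool)
    (hn : vs.length ≠ 1) :
    generateHammockRelations p vs rels isH =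
      (expandB p vs vs rels isH).flatMap (fun fr => generateHammockRelations fr.1 fr.2.1 fr.2.2.1 fr.2.2.2) := by
  rw [generateHammockRelations.eq_def, if_neg hn]
  exact goA_eq_flatMap p vs vs rels _ (fun _ hx => hx)

theorem runB_eq (results : List (List (Int × Int))) (stack : List (Int × List Int × List (Int × Int) × Bool)) :
    runB results stack =
      results ++ stack.flatMap (fun fr => generateHammockRelations fr.1 fr.2.1 fr.2.2.1 fr.2.2.2) := by
  induction results, stack using runB.induct with
  | case1 results => simp [runB]
  | case2 results p vs rels isH rest hlen ih =>
    rw [runB, if_pos hlen, ih]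
    rw [List.flatMap_cons]
    rw [generateHammockRelations.eq_def, if_pos hlen]
    simp
  | case3 results p vs rels isH rest hlen ih =>
    rw [runB, if_neg hlen, ih]
    rw [List.flatMap_cons, List.flatMap_append]
    rw [gen_eq_flatMap_expand p vs rels isH hlen]

-- ===== VERDICT (by name: the statement is the Claim_ definition above) =====
theorem generateHammockRelations_spec : Claim_equal_generateHammockRelations := by
  intro parent vertices relations isHammockLevel _
  unfold Spec_generateHammockRelations generateHammockRelations_alt
  rw [runB_eq]
  simp
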